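-- pv_equiv track=rewrite | github.com/madeso/bookshelf | book.py | strip_empty_start
-- ===== SOURCE A (Python) =====
-- import typing
--
-- def strip_empty_start(lines: typing.Iterable[str]) -> typing.Iterable[str]:
--     empty = True
--     for li in lines:
--         if len(li.strip()) == 0:
--             if empty:
--                 pass
--             else:
--                 yield li
--         else:
--             empty = False
--             yield li
-- ===== SOURCE B (Python) =====
-- def strip_empty_start(lines):
--     xs = list(lines)
--     cut = next((i for i, li in enumerate(xs) if li.strip()), len(xs))
--     return xs[cut:]
-- ===== Notes on version B (the rewrite author's own statement) =====
-- stated objective: alternative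
-- what changed: Instead of a streaming pass with an 'empty' flag that decides per line whether to emit, B materializes the input, computes the cut position (index of the first line whose strip() is non-empty, defaulting to len) with an enumerate search, and returns the single slice xs[cut:].
import Mathlib
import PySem

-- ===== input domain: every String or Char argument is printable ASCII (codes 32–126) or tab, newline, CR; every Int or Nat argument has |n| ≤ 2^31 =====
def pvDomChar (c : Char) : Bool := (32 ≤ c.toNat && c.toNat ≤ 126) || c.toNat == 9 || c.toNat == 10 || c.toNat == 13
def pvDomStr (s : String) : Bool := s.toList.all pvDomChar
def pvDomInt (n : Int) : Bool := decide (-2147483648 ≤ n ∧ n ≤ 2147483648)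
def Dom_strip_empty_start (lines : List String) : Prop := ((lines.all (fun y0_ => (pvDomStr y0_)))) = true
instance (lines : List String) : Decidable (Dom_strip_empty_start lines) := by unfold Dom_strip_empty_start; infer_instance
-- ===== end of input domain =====

-- B replaces A's streaming loop with a per-line 'empty' flag by a staged computation:
-- find the cut index of the first non-blank line via an enumerate search, then slice (alternative).

-- ===== PORT A =====
-- the generator loop: 'empty' flag threaded through the recursion over the lines
def stripA_loop (empty : Bool) : List String → List String
  | [] => []
  | li :: rest =>
      if (PySem.Str.strip li).length == 0 then
        if empty then stripA_loop empty rest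
        else li :: stripA_loop empty rest
      else
        li :: stripA_loop false rest

def strip_empty_start (lines : List String) : List String :=
  stripA_loop true lines

-- ===== PORT B =====
-- next((i for i, li in enumerate(xs) if li.strip()), len(xs))
def stripB_cut : List (Int × String) → Option Int
  | [] => none
  | (i, li) :: rest => if PySem.Str.strip li ≠ "" then some i else stripB_cut rest

def strip_empty_start_alt (lines : List String) : List String :=
  let cut := (stripB_cut (PySem.List.enumerate lines)).getD (lines.length : Int)
  PySem.List.slice lines (some cut) none

-- ===== PRECONDITION & SPEC =====
def Spec_strip_empty_start (lines : List String) (out : List String) : Prop := out = strip_empty_start_alt lines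
instance (lines : List String) (out : List String) : Decidable (Spec_strip_empty_start lines out) := by unfold Spec_strip_empty_start; infer_instance

-- ===== CLAIM (what is proved, stated in full; the proofs are below) =====
def Claim_equal_strip_empty_start : Prop := ∀ (lines : List String), Dom_strip_empty_start lines → Spec_strip_empty_start lines (strip_empty_start lines)

-- ===== LEMMAS AND PROOFS =====

-- proof-only: natural-number index of the first non-blank line
def fIdx : List String → Option Nat
  | [] => none
  | li :: rest => if PySem.Str.strip li ≠ "" then some 0 else (fIdx rest).map (· + 1)

theorem stripB_cut_enumerate (xs : List String) (s : Int) :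
    stripB_cut (PySem.List.enumerate xs s) = (fIdx xs).map (fun k => s + k) := by
  induction xs generalizing s with
  | nil => rfl
  | cons li rest ih =>
      rw [PySem.List.enumerate_cons]
      simp only [stripB_cut, fIdx]
      split_ifs with h
      · simp
      · rw [ih]
        cases fIdx rest <;> simp
        ring

-- the blank test of both programs: len(li.strip()) == 0 iff li.strip() == ""
theorem strip_len_zero_iff (s : String) :
    ((PySem.Str.strip s).length == 0) = true ↔ PySem.Str.strip s = "" := by
  generalize PySem.Str.strip s = t
  rw [beq_iff_eq, show t.length = t.toList.length from by simp,
      List.length_eq_zero_iff, String.toList_eq_nil_iff]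

-- once the flag is false, A's loop passes everything through unchanged
theorem stripA_loop_false (xs : List String) : stripA_loop false xs = xs := by
  induction xs with
  | nil => rfl
  | cons li rest ih =>
      simp only [stripA_loop]
      split_ifs <;> simp_all

-- A's loop drops exactly the prefix before the first non-blank line
theorem stripA_eq_drop (xs : List String) :
    stripA_loop true xs = xs.drop ((fIdx xs).getD xs.length) := by
  induction xs with
  | nil => rfl
  | cons li rest ih =>
      simp only [stripA_loop, fIdx]
      by_cases h : PySem.Str.strip li = ""
      · have hlen : ((PySem.Str.strip li).length == 0) = true := (strip_len_zero_iff li).mpr h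
        simp only [if_true, h, ne_eq, not_true_eq_false, if_false, ih]
        cases fIdx rest <;> simp
      · have hlen : ((PySem.Str.strip li).length == 0) = false := by
          rw [Bool.eq_false_iff]; intro hc; exact h ((strip_len_zero_iff li).mp hc)
        simp [hlen, h, stripA_loop_false]

-- ===== VERDICT (by name: the statement is the Claim_ definition above) =====
theorem strip_empty_start_spec : Claim_equal_strip_empty_start := by
  intro lines _
  unfold Spec_strip_empty_start strip_empty_start strip_empty_start_alt
  rw [stripB_cut_enumerate]
  have : ((fIdx lines).map (fun k => (0 : Int) + k)).getD (lines.length : Int)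
      = (((fIdx lines).getD lines.length : Nat) : Int) := by
    cases fIdx lines <;> simp
  rw [this, PySem.List.slice_from_natCast, stripA_eq_drop]
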